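-- pv_equiv track=rewrite | github.com/philip30/xnmt | script/simult/actions_from_align.py | align_missings
-- ===== SOURCE A (Python) =====
-- def split_alignment(align):
--   f_to_e = {}
--   e_to_f = {}
--   for f, e in align:
--     if f not in f_to_e: f_to_e[f] = []
--     if e not in e_to_f: e_to_f[e] = []
--     f_to_e[f].append(e)
--     e_to_f[e].append(f)
--   return f_to_e, e_to_f
--
-- def align_missings(len_f, len_e, align):
--   f_to_e, e_to_f = split_alignment(align)
--   missing = []
--
--   for i in range(len_e-1, -1, -1):
--     if i not in e_to_f:
--       f_align = e_to_f[i+1] if i != len_e-1 else [len_f-1]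
--       for f in f_align:
--         missing.append((f, i))
--       e_to_f[i] = f_align
--   return align + missing
-- ===== SOURCE B (Python) =====
-- def align_missings(len_f, len_e, align):
--   e_to_f = {}
--   for f, e in align:
--     e_to_f.setdefault(e, []).append(f)
--   aligned = sorted((e for e in e_to_f if 0 <= e < len_e), reverse=True)
--   hi = len_e - 1
--   fs = [len_f - 1]
--   missing = []
--   for b in aligned:
--     missing.extend((f, i) for i in range(hi, b, -1) for f in fs)
--     fs = e_to_f[b]
--     hi = b - 1
--   missing.extend((f, i) for i in range(hi, -1, -1) for f in fs)
--   return align + missing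
-- ===== Notes on version B (the rewrite author's own statement) =====
-- stated objective: alternative
-- what changed: Instead of A's per-index backward sweep that writes filled alignments back into the dict and re-reads them at i+1, B sorts the distinct in-range aligned target indices descending and emits each gap between consecutive aligned indices as one block from the upper neighbour's source list (seeded with [len_f-1] above the topmost aligned index), dropping the unused f_to_e map.
import Mathlib
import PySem

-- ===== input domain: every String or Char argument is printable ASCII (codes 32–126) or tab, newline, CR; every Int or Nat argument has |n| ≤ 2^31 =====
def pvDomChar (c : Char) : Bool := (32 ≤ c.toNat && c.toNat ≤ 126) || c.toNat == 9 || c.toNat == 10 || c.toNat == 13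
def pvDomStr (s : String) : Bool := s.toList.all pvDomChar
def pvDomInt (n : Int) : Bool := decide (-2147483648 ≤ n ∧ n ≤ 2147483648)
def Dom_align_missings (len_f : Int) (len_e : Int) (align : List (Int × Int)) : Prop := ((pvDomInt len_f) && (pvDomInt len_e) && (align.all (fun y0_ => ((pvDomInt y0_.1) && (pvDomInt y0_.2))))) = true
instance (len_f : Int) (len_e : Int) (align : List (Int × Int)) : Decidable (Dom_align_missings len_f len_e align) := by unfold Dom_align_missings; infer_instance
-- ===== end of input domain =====

-- B replaces A's backward dict write-back/read-ahead sweep by sorting the distinct in-range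
-- aligned target indices descending and emitting each gap as one block (objective: alternative).

-- ===== PORT A =====
def split_alignment (align : List (Int × Int)) :
    PySem.Dict Int (List Int) × PySem.Dict Int (List Int) :=
  align.foldl
    (fun st p =>
      let f_to_e := if st.1.contains p.1 then st.1 else st.1.insert p.1 []
      let e_to_f := if st.2.contains p.2 then st.2 else st.2.insert p.2 []
      (f_to_e.modify p.1 [] (fun l => l ++ [p.2]),
       e_to_f.modify p.2 [] (fun l => l ++ [p.1])))
    (PySem.Dict.empty, PySem.Dict.empty)

-- loop body of A's 'for i in range(len_e-1, -1, -1)'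
def amStepA (len_f len_e : Int)
    (st : PySem.Dict Int (List Int) × List (Int × Int)) (i : Int) :
    PySem.Dict Int (List Int) × List (Int × Int) :=
  if st.1.contains i then st
  else
    let f_align := if i ≠ len_e - 1 then st.1.getD (i + 1) [] else [len_f - 1]
    (st.1.insert i f_align, f_align.foldl (fun m f => m ++ [(f, i)]) st.2)

def align_missings (len_f : Int) (len_e : Int) (align : List (Int × Int)) : List (Int × Int) :=
  let fe := split_alignment align
  let res := (PySem.List.pyRange (len_e - 1) (-1) (-1)).foldl (amStepA len_f len_e) (fe.2, [])
  align ++ res.2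

-- ===== PORT B =====
-- loop body of B's 'for b in aligned' carrying (hi, fs, missing); e_to_f[b] is ported as
-- getD b [] — exact here, since every b iterated over is a key of e_to_f
def amSegStep (e_to_f : PySem.Dict Int (List Int))
    (st : Int × List Int × List (Int × Int)) (b : Int) :
    Int × List Int × List (Int × Int) :=
  (b - 1, e_to_f.getD b [],
   st.2.2 ++ (PySem.List.pyRange st.1 b (-1)).flatMap (fun i => st.2.1.map (fun f => (f, i))))

def align_missings_alt (len_f : Int) (len_e : Int) (align : List (Int × Int)) : List (Int × Int) :=
  let e_to_f := align.foldl (fun d p => d.modify p.2 [] (fun l => l ++ [p.1])) PySem.Dict.empty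
  let aligned := PySem.List.sorted
    (e_to_f.keys.filter (fun e => decide (0 ≤ e) && decide (e < len_e))) (fun x => x) true
  let st := aligned.foldl (amSegStep e_to_f) (len_e - 1, [len_f - 1], [])
  align ++ (st.2.2 ++ (PySem.List.pyRange st.1 (-1) (-1)).flatMap (fun i => st.2.1.map (fun f => (f, i))))

-- ===== PRECONDITION & SPEC =====
def Spec_align_missings (len_f : Int) (len_e : Int) (align : List (Int × Int)) (out : List (Int × Int)) : Prop := out = align_missings_alt len_f len_e align
instance (len_f : Int) (len_e : Int) (align : List (Int × Int)) (out : List (Int × Int)) : Decidable (Spec_align_missings len_f len_e align out) := by unfold Spec_align_missings; infer_instance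

-- ===== CLAIM =====
def Claim_equal_align_missings : Prop := ∀ (len_f : Int) (len_e : Int) (align : List (Int × Int)), Dom_align_missings len_f len_e align → Spec_align_missings len_f len_e align (align_missings len_f len_e align)

-- ===== LEMMAS AND PROOFS =====

-- proof-side description of the backward fill: 'amFill e0 n cur' is the missing list produced
-- for indices n-1 down to 0 when cur is the alignment propagated from above
def amFill (e0 : PySem.Dict Int (List Int)) : Nat → List Int → List (Int × Int)
  | 0, _ => []
  | n + 1, cur =>
    match e0.get? (n : Int) with
    | some fs => amFill e0 n fs
    | none => cur.map (fun f => (f, (n : Int))) ++ amFill e0 n cur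

-- proof-side description of B's segment generation
def amSeg (e0 : PySem.Dict Int (List Int)) : Int → List Int → List Int → List (Int × Int)
  | hi, fs, [] => (PySem.List.pyRange hi (-1) (-1)).flatMap (fun i => fs.map (fun f => (f, i)))
  | hi, fs, b :: rest =>
    (PySem.List.pyRange hi b (-1)).flatMap (fun i => fs.map (fun f => (f, i)))
      ++ amSeg e0 (b - 1) (e0.getD b []) rest

-- A's "ensure key then append" step on the e_to_f side equals the direct modify step.
theorem am_ensure_modify_eq (d : PySem.Dict Int (List Int)) (f e : Int) :
    ((if d.contains e then d else d.insert e []).modify e [] (fun l => l ++ [f]))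
      = d.modify e [] (fun l => l ++ [f]) := by
  by_cases h : d.contains e = true
  · simp [h]
  · simp only [Bool.not_eq_true] at h
    simp only [h, Bool.false_eq_true, if_false]
    simp only [PySem.Dict.contains, List.any_eq_false] at h
    have hfind : List.find? (fun p => p.1 == e) d.items = none :=
      List.find?_eq_none.mpr h
    simp [PySem.Dict.modify, PySem.Dict.insert, PySem.Dict.contains, PySem.Dict.getD,
      PySem.Dict.get?, List.any_append, List.any_eq_false.mpr h, hfind]
    calc List.map (fun p => if p.1 = e then (e, [f]) else p) d.items
        = List.map id d.items := by
          apply List.map_congr_left; intro p hp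
          have := h p hp; simp at this; simp [this]
      _ = d.items := List.map_id _

-- the e_to_f component of split_alignment is exactly B's one-dict fold
theorem am_split_snd (align : List (Int × Int)) :
    ∀ st : PySem.Dict Int (List Int) × PySem.Dict Int (List Int),
    (align.foldl
      (fun st p =>
        let f_to_e := if st.1.contains p.1 then st.1 else st.1.insert p.1 []
        let e_to_f := if st.2.contains p.2 then st.2 else st.2.insert p.2 []
        (f_to_e.modify p.1 [] (fun l => l ++ [p.2]),
         e_to_f.modify p.2 [] (fun l => l ++ [p.1])))
      st).2
    = align.foldl (fun d p => d.modify p.2 [] (fun l => l ++ [p.1])) st.2 := by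
  intro st
  obtain ⟨d1, d2⟩ := st
  simp only [am_ensure_modify_eq]
  have h := PySem.List.foldl_prod_mk
    (fun (d : PySem.Dict Int (List Int)) (p : Int × Int) => d.modify p.1 [] (fun l => l ++ [p.2]))
    (fun (d : PySem.Dict Int (List Int)) (p : Int × Int) => d.modify p.2 [] (fun l => l ++ [p.1]))
    align d1 d2
  rw [h]

-- A's backward loop produces amFill
theorem am_loopA_eq_fill (len_f len_e : Int) (e0 : PySem.Dict Int (List Int)) :
    ∀ (k : Nat) (a : Int), a < (k : Int) → a ≤ len_e - 1 →
    ∀ (d : PySem.Dict Int (List Int)) (cur : List Int) (m : List (Int × Int)),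
    (∀ j : Int, j ≤ a → d.get? j = e0.get? j) →
    cur = (if a = len_e - 1 then [len_f - 1] else d.getD (a + 1) []) →
    ((PySem.List.pyRange a (-1) (-1)).foldl (amStepA len_f len_e) (d, m)).2
      = m ++ amFill e0 (a + 1).toNat cur := by
  intro k
  induction k with
  | zero =>
    intro a ha _ d cur m _ _
    rw [PySem.List.pyRange_neg_one_eq_nil (by push_cast at ha; omega)]
    rw [show (a + 1).toNat = 0 by omega]
    simp [amFill]
  | succ k ih =>
    intro a ha hle d cur m hget hcur
    by_cases hneg : a ≤ -1
    · rw [PySem.List.pyRange_neg_one_eq_nil hneg]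
      rw [show (a + 1).toNat = 0 by omega]
      simp [amFill]
    · have h0 : (-1 : Int) < a := by omega
      have htn : (a + 1).toNat = a.toNat + 1 := by omega
      have hcast : ((a.toNat : Int)) = a := by omega
      rw [PySem.List.pyRange_neg_one_cons h0]
      simp only [List.foldl_cons]
      rw [htn]
      by_cases hc : d.contains a = true
      · obtain ⟨fs, hfs⟩ : ∃ fs, d.get? a = some fs := by
          rw [PySem.Dict.contains_eq_isSome_get?] at hc
          exact Option.isSome_iff_exists.mp hc
        have hB : e0.get? a = some fs := (hget a le_rfl) ▸ hfs
        rw [show amStepA len_f len_e (d, m) a = (d, m) by simp [amStepA, hc]]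
        rw [show amFill e0 (a.toNat + 1) cur = amFill e0 a.toNat fs by
          simp only [amFill, hcast, hB]]
        rw [show a.toNat = (a - 1 + 1).toNat by omega]
        apply ih (a - 1) (by omega) (by omega)
        · intro j hj; exact hget j (by omega)
        · rw [if_neg (by omega), show a - 1 + 1 = a by omega]
          exact (PySem.Dict.getD_of_get?_eq_some d [] hfs).symm
      · have hcB : e0.get? a = none := by
          rw [← hget a le_rfl, PySem.Dict.get?_eq_none_iff_contains]
          simpa using hc
        have hfa : (if a ≠ len_e - 1 then d.getD (a + 1) [] else [len_f - 1]) = cur := by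
          by_cases he : a = len_e - 1
          · simp [he, hcur]
          · rw [if_pos he, hcur, if_neg he]
        rw [show amStepA len_f len_e (d, m) a
              = (d.insert a cur, m ++ cur.map (fun f => (f, a))) by
            simp only [amStepA, hc, Bool.false_eq_true, if_false, hfa,
              PySem.List.foldl_append_singleton_eq_map (fun f => (f, a)) cur m]]
        rw [show amFill e0 (a.toNat + 1) cur
              = cur.map (fun f => (f, a)) ++ amFill e0 a.toNat cur by
          simp only [amFill, hcast, hcB]]
        rw [show a.toNat = (a - 1 + 1).toNat by omega]
        rw [ih (a - 1) (by omega) (by omega) (d.insert a cur) cur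
              (m ++ cur.map (fun f => (f, a)))
              (fun j hj => by
                rw [PySem.Dict.get?_insert_of_ne d cur (by omega : j ≠ a)]
                exact hget j (by omega))
              (by rw [if_neg (by omega), show a - 1 + 1 = a by omega,
                    PySem.Dict.getD_insert_self])]
        simp

-- B's segment loop produces amSeg
theorem am_loopB_eq_seg (e0 : PySem.Dict Int (List Int)) :
    ∀ (L : List Int) (hi : Int) (fs : List Int) (m : List (Int × Int)),
    (L.foldl (amSegStep e0) (hi, fs, m)).2.2
      ++ (PySem.List.pyRange (L.foldl (amSegStep e0) (hi, fs, m)).1 (-1) (-1)).flatMap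
           (fun i => ((L.foldl (amSegStep e0) (hi, fs, m)).2.1).map (fun f => (f, i)))
      = m ++ amSeg e0 hi fs L := by
  intro L
  induction L with
  | nil => intro hi fs m; simp [amSeg]
  | cons b rest ih =>
    intro hi fs m
    simp only [List.foldl_cons, amSegStep]
    rw [ih]
    simp [amSeg]

-- the fill and the segment generation agree when L lists exactly the in-range aligned indices,
-- strictly descending
theorem am_fill_eq_seg (e0 : PySem.Dict Int (List Int)) :
    ∀ (k : Nat) (hi : Int), hi < (k : Int) →
    ∀ (cur : List Int) (L : List Int),
    L.Pairwise (· > ·) →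
    (∀ b ∈ L, 0 ≤ b ∧ b ≤ hi) →
    (∀ j : Int, 0 ≤ j → j ≤ hi → (e0.contains j = true ↔ j ∈ L)) →
    amFill e0 (hi + 1).toNat cur = amSeg e0 hi cur L := by
  intro k
  induction k with
  | zero =>
    intro hi hk cur L _ hbound _
    have hL : L = [] := by
      cases L with
      | nil => rfl
      | cons b rest =>
        exact absurd (hbound b (by simp)) (by push_cast at hk; omega)
    subst hL
    rw [show (hi + 1).toNat = 0 by push_cast at hk; omega]
    simp [amFill, amSeg, PySem.List.pyRange_neg_one_eq_nil (by push_cast at hk; omega : hi ≤ -1)]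
  | succ k ih =>
    intro hi hk cur L hpw hbound hmem
    by_cases hneg : hi ≤ -1
    · have hL : L = [] := by
        cases L with
        | nil => rfl
        | cons b rest => exact absurd (hbound b (by simp)) (by omega)
      subst hL
      rw [show (hi + 1).toNat = 0 by omega]
      simp [amFill, amSeg, PySem.List.pyRange_neg_one_eq_nil hneg]
    · have h0 : (0 : Int) ≤ hi := by omega
      have htn : (hi + 1).toNat = hi.toNat + 1 := by omega
      have hcast : ((hi.toNat : Int)) = hi := by omega
      rw [htn]
      cases L with
      | nil =>
        have hnc : e0.get? hi = none := by
          rw [PySem.Dict.get?_eq_none_iff_contains]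
          rcases Bool.eq_false_or_eq_true (e0.contains hi) with h | h
          · exact absurd ((hmem hi h0 le_rfl).mp h) (by simp)
          · exact h
        rw [show amFill e0 (hi.toNat + 1) cur
              = cur.map (fun f => (f, hi)) ++ amFill e0 hi.toNat cur by
          simp only [amFill, hcast, hnc]]
        rw [show hi.toNat = (hi - 1 + 1).toNat by omega]
        rw [ih (hi - 1) (by omega) cur [] (by simp) (by simp)
            (fun j hj1 hj2 => hmem j hj1 (by omega))]
        simp only [amSeg]
        rw [PySem.List.pyRange_neg_one_cons (by omega : (-1 : Int) < hi)]
        simp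
      | cons b rest =>
        obtain ⟨hb0, hbhi⟩ := hbound b (by simp)
        have hrest_lt : ∀ x ∈ rest, x < b := by
          intro x hx
          exact List.rel_of_pairwise_cons hpw hx
        by_cases hbe : b = hi
        · subst hbe
          have hcc : e0.contains b = true := (hmem b hb0 le_rfl).mpr (by simp)
          obtain ⟨fs, hfs⟩ : ∃ fs, e0.get? b = some fs := by
            rw [PySem.Dict.contains_eq_isSome_get?] at hcc
            exact Option.isSome_iff_exists.mp hcc
          rw [show amFill e0 (b.toNat + 1) cur = amFill e0 b.toNat fs by
            simp only [amFill, hcast, hfs]]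
          simp only [amSeg]
          rw [PySem.List.pyRange_neg_one_eq_nil le_rfl]
          simp only [List.flatMap_nil, List.nil_append]
          rw [show b.toNat = (b - 1 + 1).toNat by omega]
          rw [PySem.Dict.getD_of_get?_eq_some e0 [] hfs]
          apply ih (b - 1) (by omega) fs rest ((List.pairwise_cons.mp hpw).2)
          · intro x hx
            exact ⟨(hbound x (List.mem_cons_of_mem b hx)).1, by have := hrest_lt x hx; omega⟩
          · intro j hj1 hj2
            rw [hmem j hj1 (by omega), List.mem_cons]
            constructor
            · rintro (rfl | h)
              · exact absurd hj2 (by omega)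
              · exact h
            · exact fun h => Or.inr h
        · have hblt : b < hi := by omega
          have hnotmem : hi ∉ b :: rest := by
            intro h
            rcases List.mem_cons.mp h with h | h
            · omega
            · have := hrest_lt hi h; omega
          have hnc : e0.get? hi = none := by
            rw [PySem.Dict.get?_eq_none_iff_contains]
            rcases Bool.eq_false_or_eq_true (e0.contains hi) with h | h
            · exact absurd ((hmem hi h0 le_rfl).mp h) hnotmem
            · exact h
          rw [show amFill e0 (hi.toNat + 1) cur
                = cur.map (fun f => (f, hi)) ++ amFill e0 hi.toNat cur by
            simp only [amFill, hcast, hnc]]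
          rw [show hi.toNat = (hi - 1 + 1).toNat by omega]
          rw [ih (hi - 1) (by omega) cur (b :: rest) hpw
              (fun x hx => ⟨(hbound x hx).1, by
                rcases List.mem_cons.mp hx with rfl | hx
                · omega
                · have := hrest_lt x hx; omega⟩)
              (fun j hj1 hj2 => hmem j hj1 (by omega))]
          simp only [amSeg]
          rw [PySem.List.pyRange_neg_one_cons hblt]
          simp

-- ===== VERDICT =====
theorem align_missings_spec : Claim_equal_align_missings := by
  intro len_f len_e align _
  unfold Spec_align_missings align_missings align_missings_alt
  simp only []
  set e0 := align.foldl (fun d p => d.modify p.2 [] (fun l => l ++ [p.1])) PySem.Dict.empty with he0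
  have hsplit : (split_alignment align).2 = e0 := by
    unfold split_alignment; exact am_split_snd align _
  have hnodupkeys : e0.keys.Nodup := by
    rw [he0]
    exact PySem.Dict.nodup_keys_foldl_modify_key align (fun p => p.2) []
      (fun d p => fun l => l ++ [p.1]) PySem.Dict.empty PySem.Dict.nodup_keys_empty
  set flt := e0.keys.filter (fun e => decide (0 ≤ e) && decide (e < len_e)) with hflt
  set aligned := PySem.List.sorted flt (fun x => x) true with haligned
  have hmemflt : ∀ j : Int, j ∈ flt ↔ (e0.contains j = true ∧ 0 ≤ j ∧ j < len_e) := by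
    intro j
    rw [hflt, List.mem_filter]
    simp [PySem.Dict.contains_iff_mem_keys]
  have hmemal : ∀ j : Int, j ∈ aligned ↔ (e0.contains j = true ∧ 0 ≤ j ∧ j < len_e) := by
    intro j
    rw [haligned, PySem.List.mem_sorted]
    exact hmemflt j
  have hnodupal : aligned.Nodup := by
    rw [haligned]
    exact ((PySem.List.sorted_perm flt (fun x => x) true).nodup_iff).mpr (hnodupkeys.filter _)
  have hge : aligned.Pairwise (fun a b => b ≤ a) := by
    rw [haligned]
    exact PySem.List.sorted_pairwise_rev flt (fun x => x)
  have hpw : aligned.Pairwise (· > ·) := by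
    have := List.Pairwise.and hge hnodupal
    exact this.imp (fun h => lt_of_le_of_ne h.1 h.2.symm)
  congr 1
  rw [hsplit]
  rw [am_loopA_eq_fill len_f len_e e0 (len_e.toNat + 1) (len_e - 1) (by omega) le_rfl e0
        [len_f - 1] [] (fun j _ => rfl) (by simp)]
  rw [am_loopB_eq_seg e0 aligned (len_e - 1) [len_f - 1] []]
  simp only [List.nil_append]
  apply am_fill_eq_seg e0 (len_e.toNat + 1) (len_e - 1) (by omega)
  · exact hpw
  · intro b hb
    have := (hmemal b).mp hb
    omega
  · intro j hj1 hj2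
    constructor
    · intro h; exact (hmemal j).mpr ⟨h, hj1, by omega⟩
    · intro h; exact ((hmemal j).mp h).1
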